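-- pv_equiv track=rewrite | github.com/Ofir7909/advent-of-code-2024 | day19/day19.py | part1
-- ===== SOURCE A (Python) =====
-- from functools import wraps
--
-- def memoize(func):
--     cache = {}
--
--     @wraps(func)
--     def wrapper(*args, **kwargs):
--         if args not in cache:
--             cache[args] = func(*args)
--         return cache[args]
--
--     return wrapper
--
-- def part1(towels, designs):
--     @memoize
--     def is_possible(design: str):
--         if len(design) == 0:
--             return True
--         for t in towels:
--             if design.startswith(t):
--                 if is_possible(design[len(t) :]):
--                     return True
--         return False
--
--     possible_designs = 0
--     for d in designs:
--         if is_possible(d):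
--             possible_designs += 1
--
--     return possible_designs
-- ===== SOURCE B (Python) =====
-- def part1(towels, designs):
--     count = 0
--     for d in designs:
--         n = len(d)
--         dp = [True] + [False] * n
--         for i in range(1, n + 1):
--             dp[i] = any(len(t) <= i and dp[i - len(t)] and d.startswith(t, i - len(t))
--                         for t in towels)
--         if dp[n]:
--             count += 1
--     return count
-- ===== Notes on version B (the rewrite author's own statement) =====
-- stated objective: alternative
-- what changed: Replaces A's memoized top-down recursion on design suffixes with an iterative bottom-up DP per design: a boolean table over prefix positions where dp[i] is true iff the first i characters can be tiled, filled left to right, no recursion or cache.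
import Mathlib
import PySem

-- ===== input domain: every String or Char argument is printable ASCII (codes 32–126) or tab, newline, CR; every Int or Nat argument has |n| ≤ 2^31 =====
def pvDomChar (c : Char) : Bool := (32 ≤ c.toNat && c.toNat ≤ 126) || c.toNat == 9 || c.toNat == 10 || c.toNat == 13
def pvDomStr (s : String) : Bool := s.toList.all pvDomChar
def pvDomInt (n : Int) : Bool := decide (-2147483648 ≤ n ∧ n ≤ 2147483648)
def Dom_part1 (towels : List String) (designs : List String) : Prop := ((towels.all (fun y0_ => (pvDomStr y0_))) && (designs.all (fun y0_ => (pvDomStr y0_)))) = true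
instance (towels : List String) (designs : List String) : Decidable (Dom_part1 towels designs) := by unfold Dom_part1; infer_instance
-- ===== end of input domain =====

-- B replaces A's memoized top-down suffix recursion by an iterative bottom-up DP over prefix
-- positions (objective: alternative decomposition, same asymptotic cost).

-- ===== PORT A =====
-- A's is_possible, on the design's character list. The @memoize cache only affects running
-- time, never the value, so it is not modelled. The recursion is made total with fuel
-- |design|+1, which suffices whenever "" ∉ towels (each step removes ≥ 1 character); with
-- "" ∈ towels and a nonempty design Python A diverges (RecursionError), outside Pre_part1.
-- design.startswith(t) → PySem.Chars.startswith; design[len(t):] (nonnegative start) is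
-- exactly List.drop (PySem.List.slice_from_natCast).
def isPossibleA (towels : List String) : Nat → List Char → Bool
  | 0, _ => false
  | fuel + 1, s =>
    if s.length = 0 then true
    else towels.any (fun t =>
      PySem.Chars.startswith s t.toList &&
      isPossibleA towels fuel (s.drop t.toList.length))

def part1 (towels : List String) (designs : List String) : Int :=
  designs.foldl
    (fun acc d => if isPossibleA towels (d.toList.length + 1) d.toList then acc + 1 else acc) 0

-- ===== PORT B =====
-- One DP row step: dp[i] = any(len(t) <= i and dp[i-len(t)] and d.startswith(t, i-len(t))).
-- dp[i-len(t)]: the guard len(t) <= i keeps the index in 0..i ⊆ range, so List.getD is exact;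
-- d.startswith(t, j) with 0 ≤ j ≤ len(d) equals d[j:].startswith(t), ported as
-- PySem.Chars.startswith on List.drop j.
def rowStep (towels : List String) (d : List Char) (dp : List Bool) (i : Nat) : List Bool :=
  dp.set i (towels.any (fun t =>
    decide (t.toList.length ≤ i) &&
    dp.getD (i - t.toList.length) false &&
    PySem.Chars.startswith (d.drop (i - t.toList.length)) t.toList))

-- the loop 'for i in range(1, n+1)' has nonnegative bounds, ported as List.range' 1 n.
def part1_alt (towels : List String) (designs : List String) : Int :=
  designs.foldl
    (fun count d =>
      if ((List.range' 1 d.toList.length).foldl (rowStep towels d.toList)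
            (true :: List.replicate d.toList.length false)).getD d.toList.length false
      then count + 1 else count) 0

-- ===== PRECONDITION & SPEC =====
-- Pre_ excludes exactly the inputs where Python A diverges with RecursionError: a towel ""
-- together with at least one nonempty design (is_possible recurses on an unchanged argument).
def Pre_part1 (towels : List String) (designs : List String) : Prop :=
  "" ∉ towels ∨ ∀ d ∈ designs, d = ""
instance (towels : List String) (designs : List String) : Decidable (Pre_part1 towels designs) := by
  unfold Pre_part1; infer_instance

def pvWitness_part1 : List String × List String := (["r", "g", "rb"], ["rg", "b", ""])

def Spec_part1 (towels : List String) (designs : List String) (out : Int) : Prop :=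
  out = part1_alt towels designs
instance (towels : List String) (designs : List String) (out : Int) : Decidable (Spec_part1 towels designs out) := by unfold Spec_part1; infer_instance

-- ===== CLAIM (what is proved, stated in full; the proofs are below) =====
def Claim_equal_part1 : Prop := ∀ (towels : List String) (designs : List String), Dom_part1 towels designs → Pre_part1 towels designs → Spec_part1 towels designs (part1 towels designs)

-- ===== LEMMAS AND PROOFS =====

-- The common specification: s is a concatenation of towels.
def DecCat (towels : List String) (s : List Char) : Prop :=
  ∃ parts : List String, (∀ p ∈ parts, p ∈ towels) ∧ (parts.map String.toList).flatten = s

lemma toList_ne_nil_of_mem {towels : List String} (hne : "" ∉ towels)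
    {t : String} (ht : t ∈ towels) : t.toList ≠ [] := by
  intro h
  have : t = "" := by cases t; simp_all
  exact hne (this ▸ ht)

-- A's recursion is sound for DecCat (any fuel).
lemma aSound (towels : List String) :
    ∀ fuel s, isPossibleA towels fuel s = true → DecCat towels s := by
  intro fuel
  induction fuel with
  | zero => intro s h; simp [isPossibleA] at h
  | succ f ih =>
    intro s h
    by_cases hs : s.length = 0
    · exact ⟨[], by simp, by simp [List.length_eq_zero_iff.mp hs]⟩
    · simp only [isPossibleA, if_neg hs, List.any_eq_true, Bool.and_eq_true] at h
      obtain ⟨t, htmem, hpre, hrec⟩ := h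
      obtain ⟨parts, hp, hflat⟩ := ih _ hrec
      obtain ⟨u, hu⟩ := (PySem.Chars.startswith_iff s t.toList).mp hpre
      refine ⟨t :: parts, ?_, ?_⟩
      · intro p hp'
        rcases List.mem_cons.mp hp' with rfl | h
        · exact htmem
        · exact hp _ h
      · have hdrop : s.drop t.toList.length = u := by
          rw [← hu]; simp
        simp [hflat, ← hu]

-- A's recursion is complete for DecCat given enough fuel and no empty towel.
lemma aComplete (towels : List String) (hne : "" ∉ towels) :
    ∀ (parts : List String) (s : List Char) (fuel : Nat),
      (∀ p ∈ parts, p ∈ towels) → (parts.map String.toList).flatten = s →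
      s.length < fuel → isPossibleA towels fuel s = true := by
  intro parts
  induction parts with
  | nil =>
    intro s fuel _ hflat hfuel
    obtain ⟨f, rfl⟩ : ∃ f, fuel = f + 1 := ⟨fuel - 1, by omega⟩
    simp at hflat
    simp [isPossibleA, ← hflat]
  | cons p rest ih =>
    intro s fuel hmem hflat hfuel
    obtain ⟨f, rfl⟩ : ∃ f, fuel = f + 1 := ⟨fuel - 1, by omega⟩
    have hpmem : p ∈ towels := hmem p (by simp)
    have hplen : p.toList ≠ [] := toList_ne_nil_of_mem hne hpmem
    simp only [List.map_cons, List.flatten_cons] at hflat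
    have hslen : s.length = p.toList.length + ((rest.map String.toList).flatten).length := by
      rw [← hflat]; simp
    have hrec : isPossibleA towels f (s.drop p.toList.length) = true := by
      have hdrop : s.drop p.toList.length = (rest.map String.toList).flatten := by
        rw [← hflat]; simp
      refine ih _ f (fun q hq => hmem q (by simp [hq])) hdrop.symm ?_
      have hd : (s.drop p.toList.length).length = s.length - p.toList.length := by simp
      have hp1 : 0 < p.toList.length := List.length_pos_iff.mpr hplen
      omega
    have hslen0 : s.length ≠ 0 := by
      have := List.length_pos_iff.mpr hplen; omega
    simp only [isPossibleA, if_neg hslen0, List.any_eq_true, Bool.and_eq_true]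
    exact ⟨p, hpmem, (PySem.Chars.startswith_iff s p.toList).mpr ⟨_, hflat⟩, hrec⟩

lemma aIff (towels : List String) (hne : "" ∉ towels) (s : List Char) :
    (isPossibleA towels (s.length + 1) s = true ↔ DecCat towels s) :=
  ⟨aSound towels _ s, fun ⟨parts, hp, hflat⟩ =>
    aComplete towels hne parts s _ hp hflat (by omega)⟩

-- B's DP invariant: after processing positions 1..i, entries 0..i are final and equal the
-- prefix-decomposability predicate; entries above i are still false.
lemma dpInv (towels : List String) (d : List Char) (hne : "" ∉ towels) :
    ∀ i, i ≤ d.length →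
      (((List.range' 1 i).foldl (rowStep towels d)
          (true :: List.replicate d.length false)).length = d.length + 1) ∧
      (∀ j ≤ i, (((List.range' 1 i).foldl (rowStep towels d)
          (true :: List.replicate d.length false)).getD j false = true ↔
          DecCat towels (d.take j))) ∧
      (∀ j, i < j → ((List.range' 1 i).foldl (rowStep towels d)
          (true :: List.replicate d.length false)).getD j false = false) := by
  intro i
  induction i with
  | zero =>
    intro _
    refine ⟨by simp, ?_, ?_⟩
    · intro j hj
      interval_cases j
      simp only [List.range'_zero, List.foldl_nil, List.getD_cons_zero]
      constructor
      · intro _; exact ⟨[], by simp, by simp⟩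
      · intro _; trivial
    · intro j hj
      obtain ⟨k, rfl⟩ : ∃ k, j = k + 1 := ⟨j - 1, by omega⟩
      simp only [List.range'_zero, List.foldl_nil, List.getD_cons_succ]
      simp only [List.getD, List.getElem?_replicate]
      split <;> simp
  | succ i ih =>
    intro hi1
    obtain ⟨hlen, hlow, hhigh⟩ := ih (by omega)
    set dp := (List.range' 1 i).foldl (rowStep towels d)
        (true :: List.replicate d.length false) with hdp
    have hconcat : List.range' 1 (i + 1) = List.range' 1 i ++ [1 + i] := by
      rw [List.range'_concat]; simp
    have hfold : (List.range' 1 (i + 1)).foldl (rowStep towels d)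
        (true :: List.replicate d.length false) = rowStep towels d dp (1 + i) := by
      rw [hconcat, List.foldl_append]; rfl
    have hidx : 1 + i = i + 1 := by omega
    rw [hfold, hidx]
    have hset_len : (rowStep towels d dp (i + 1)).length = d.length + 1 := by
      simp [rowStep, hlen]
    -- value written at position i+1
    set b := towels.any (fun t =>
      decide (t.toList.length ≤ i + 1) &&
      dp.getD (i + 1 - t.toList.length) false &&
      PySem.Chars.startswith (d.drop (i + 1 - t.toList.length)) t.toList) with hb
    have hget_set : ∀ j, (rowStep towels d dp (i + 1)).getD j false =
        if j = i + 1 then b else dp.getD j false := by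
      intro j
      by_cases hji : j = i + 1
      · subst hji
        simp only [rowStep, List.getD]
        rw [List.getElem?_set_self (by omega)]
        simp only [Option.getD_some]
        exact hb.symm
      · simp only [rowStep, List.getD, if_neg hji]
        rw [List.getElem?_set_ne (by omega)]
    -- the key equivalence at position i+1
    have hkey : (b = true) ↔ DecCat towels (d.take (i + 1)) := by
      rw [hb]
      simp only [List.any_eq_true, Bool.and_eq_true, decide_eq_true_eq]
      constructor
      · rintro ⟨t, htmem, ⟨hlt, hdpv⟩, hsw⟩
        have htne := toList_ne_nil_of_mem hne htmem
        have htpos : 0 < t.toList.length := List.length_pos_iff.mpr htne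
        obtain ⟨parts, hp, hflat⟩ := (hlow _ (by omega)).mp hdpv
        refine ⟨parts ++ [t], ?_, ?_⟩
        · intro q hq
          rcases List.mem_append.mp hq with h | h
          · exact hp _ h
          · simp at h; exact h ▸ htmem
        · obtain ⟨u, hu⟩ := (PySem.Chars.startswith_iff _ _).mp hsw
          have htake : List.take t.toList.length (d.drop (i + 1 - t.toList.length)) = t.toList := by
            rw [← hu]; simp
          have : i + 1 = (i + 1 - t.toList.length) + t.toList.length := by omega
          rw [List.map_append, List.flatten_append, hflat, this, List.take_add, htake]
          simp
      · rintro ⟨parts, hp, hflat⟩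
        have htlen : (d.take (i + 1)).length = i + 1 := by
          simp; omega
        rcases List.eq_nil_or_concat parts with rfl | ⟨init, t, rfl⟩
        · exfalso
          simp only [List.map_nil, List.flatten_nil] at hflat
          rw [← hflat] at htlen
          simp at htlen
        · rw [List.concat_eq_append] at hp hflat
          have htmem : t ∈ towels := hp t (by simp)
          have htne := toList_ne_nil_of_mem hne htmem
          have htpos : 0 < t.toList.length := List.length_pos_iff.mpr htne
          rw [List.map_append, List.flatten_append] at hflat
          simp only [List.map_cons, List.map_nil, List.flatten_cons, List.flatten_nil,
            List.append_nil] at hflat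
          have hlen_eq : ((init.map String.toList).flatten).length + t.toList.length = i + 1 := by
            have h3 := congrArg List.length hflat
            rw [List.length_append, htlen] at h3
            exact h3
          have htle : t.toList.length ≤ i + 1 := by omega
          refine ⟨t, htmem, ⟨htle, ?_⟩, ?_⟩
          · -- dp entry at i+1-|t| holds: decomposition of that prefix is init
            rw [hlow _ (by omega)]
            refine ⟨init, fun q hq => hp q (by simp [hq]), ?_⟩
            have hm : i + 1 - t.toList.length = ((init.map String.toList).flatten).length := by
              omega
            have h1 : (init.map String.toList).flatten =
                List.take (i + 1 - t.toList.length) (d.take (i + 1)) := by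
              rw [← hflat, hm, List.take_left]
            rw [h1, List.take_take]
            congr 1; omega
          · -- t starts at position i+1-|t|
            rw [PySem.Chars.startswith_iff]
            have hm : i + 1 - t.toList.length = ((init.map String.toList).flatten).length := by
              omega
            have hdropped : t.toList = List.drop (i + 1 - t.toList.length) (d.take (i + 1)) := by
              rw [← hflat, hm, List.drop_left]
            have h2 : List.drop (i + 1 - t.toList.length) (d.take (i + 1)) =
                List.take (t.toList.length) (List.drop (i + 1 - t.toList.length) d) := by
              rw [List.drop_take]
              congr 1; omega
            have h3 : t.toList =
                List.take t.toList.length (List.drop (i + 1 - t.toList.length) d) :=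
              hdropped.trans h2
            conv_lhs => rw [h3]
            exact List.take_prefix _ _
    refine ⟨hset_len, ?_, ?_⟩
    · intro j hj
      rw [hget_set]
      by_cases hji : j = i + 1
      · subst hji; simp [hkey]
      · rw [if_neg hji]; exact hlow _ (by omega)
    · intro j hj
      rw [hget_set, if_neg (by omega)]
      exact hhigh _ (by omega)

-- per-design agreement of the two boolean tests
lemma perDesign (towels : List String) (d : String)
    (h : d = "" ∨ "" ∉ towels) :
    isPossibleA towels (d.toList.length + 1) d.toList =
    ((List.range' 1 d.toList.length).foldl (rowStep towels d.toList)
        (true :: List.replicate d.toList.length false)).getD d.toList.length false := by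
  rcases h with rfl | hne
  · simp [isPossibleA]
  · obtain ⟨_, hlow, _⟩ := dpInv towels d.toList hne d.toList.length le_rfl
    rw [Bool.eq_iff_iff, aIff towels hne d.toList, hlow _ le_rfl, List.take_length]

lemma foldl_aux (towels : List String) :
    ∀ (l : List String) (acc : Int),
      (∀ d ∈ l, isPossibleA towels (d.toList.length + 1) d.toList =
        ((List.range' 1 d.toList.length).foldl (rowStep towels d.toList)
            (true :: List.replicate d.toList.length false)).getD d.toList.length false) →
      l.foldl (fun acc d =>
          if isPossibleA towels (d.toList.length + 1) d.toList then acc + 1 else acc) acc =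
      l.foldl (fun count d =>
          if ((List.range' 1 d.toList.length).foldl (rowStep towels d.toList)
                (true :: List.replicate d.toList.length false)).getD d.toList.length false
          then count + 1 else count) acc := by
  intro l
  induction l with
  | nil => intro acc _; rfl
  | cons d rest ih =>
    intro acc h
    simp only [List.foldl_cons]
    rw [h d (by simp)]
    exact ih _ (fun q hq => h q (by simp [hq]))

lemma foldl_count_eq (towels : List String) (designs : List String)
    (h : ∀ d ∈ designs,
      isPossibleA towels (d.toList.length + 1) d.toList =
      ((List.range' 1 d.toList.length).foldl (rowStep towels d.toList)
          (true :: List.replicate d.toList.length false)).getD d.toList.length false) :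
    part1 towels designs = part1_alt towels designs := by
  unfold part1 part1_alt
  exact foldl_aux towels designs 0 h

-- ===== VERDICT (by name: the statement is the Claim_ definition above) =====
theorem part1_spec : Claim_equal_part1 := by
  intro towels designs _ hpre
  unfold Spec_part1
  apply foldl_count_eq
  intro d hd
  apply perDesign
  rcases hpre with h | h
  · exact Or.inr h
  · exact Or.inl (h d hd)
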